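-- pv_equiv track=rewrite | github.com/ome/omero-scripts | omero/annotation_scripts/KeyVal_to_csv.py | group_keyvalue_dictionaries
-- ===== SOURCE A (Python) =====
-- from collections import OrderedDict
--
-- def group_keyvalue_dictionaries(annotation_dicts, zero_padding):
--     """ Groups the keys and values of each object into a single dictionary """
--     all_key = OrderedDict() # To keep the keys in order, for what it's worth
--     for annotation_dict in annotation_dicts:
--         all_key.update({k:None for k in annotation_dict.keys()})
--     all_key = list(all_key.keys())
--
--     result = []
--     for annotation_dict in annotation_dicts:
--         obj_dict = OrderedDict((k, "") for k in all_key)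
--         obj_dict.update(annotation_dict)
--         for k,v in obj_dict.items():
--             if v is None:
--                 obj_dict[k]
--         result.append(list(obj_dict.values()))
--
--     all_key = [key[zero_padding:] for key in all_key] # Removing temporary padding
--     return all_key, result
-- ===== SOURCE B (Python) =====
-- def group_keyvalue_dictionaries(annotation_dicts, zero_padding):
--     """ Groups the keys and values of each object into a single dictionary """
--     # Online single pass: when a dict introduces new keys, pad all earlier
--     # rows with "" for them (new keys go at the end, so first-appearance
--     # order and previously-built rows stay correct).
--     keys, rows = [], []
--     for annotation_dict in annotation_dicts:
--         new = [k for k in annotation_dict if k not in keys]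
--         keys = keys + new
--         rows = [row + [""] * len(new) for row in rows]
--         rows.append([annotation_dict.get(k, "") for k in keys])
--     return [k[zero_padding:] for k in keys], rows
-- ===== Notes on version B (the rewrite author's own statement) =====
-- stated objective: alternative
-- what changed: A builds the full key union first and then, in a second staged pass, overlays each dict on a pre-filled template OrderedDict; B is a single online pass that appends each dict's row immediately and, whenever a dict introduces new keys, pads all previously built rows with "" for them (new keys go at the end, so first-appearance order and earlier rows remain correct).
import Mathlib
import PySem

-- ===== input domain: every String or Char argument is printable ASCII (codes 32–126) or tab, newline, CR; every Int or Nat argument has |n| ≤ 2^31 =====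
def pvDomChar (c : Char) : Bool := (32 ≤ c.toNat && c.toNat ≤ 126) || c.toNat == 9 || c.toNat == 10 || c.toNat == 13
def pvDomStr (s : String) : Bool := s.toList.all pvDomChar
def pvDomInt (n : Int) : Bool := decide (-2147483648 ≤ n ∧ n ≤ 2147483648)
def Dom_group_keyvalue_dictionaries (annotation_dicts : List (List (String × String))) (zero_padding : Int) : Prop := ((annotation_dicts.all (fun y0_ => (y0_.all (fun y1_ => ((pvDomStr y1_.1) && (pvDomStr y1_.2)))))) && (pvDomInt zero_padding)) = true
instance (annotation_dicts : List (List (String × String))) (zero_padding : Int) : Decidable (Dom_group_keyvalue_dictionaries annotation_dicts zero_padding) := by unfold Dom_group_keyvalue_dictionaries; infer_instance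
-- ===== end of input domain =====

-- B replaces A's two staged passes (key union, then per-object template-dict overlay) by ONE online
-- pass that pads all previously built rows with "" whenever a dict introduces new keys (objective:
-- alternative — a streaming decomposition of the same O(n*m) task).


-- ===== PORT A =====
-- each Python dict argument is the association list read with dict semantics: PySem.Dict.ofList
def group_keyvalue_dictionaries (annotation_dicts : List (List (String × String))) (zero_padding : Int) : List String × List (List String) :=
  -- all_key = OrderedDict(); for d in annotation_dicts: all_key.update({k: None for k in d.keys()})
  let allKeyDict : PySem.Dict String (Option String) :=
    annotation_dicts.foldl
      (fun acc d => acc.update (((PySem.Dict.ofList d).keys).map (fun k => (k, (none : Option String)))))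
      PySem.Dict.empty
  let all_key : List String := allKeyDict.keys
  -- result = []; for d: obj_dict = OrderedDict((k, "") for k in all_key); obj_dict.update(d); result.append(list(obj_dict.values()))
  -- (the 'for k,v in obj_dict.items(): if v is None: obj_dict[k]' loop has no effect: every value is a string, never None)
  let result : List (List String) :=
    annotation_dicts.foldl
      (fun res d =>
        let objDict := (all_key.foldl (fun (o : PySem.Dict String String) (k : String) => o.insert k "") PySem.Dict.empty).update d
        res ++ [objDict.values])
      []
  -- all_key = [key[zero_padding:] for key in all_key]
  (all_key.map (fun key => PySem.Str.slice key (some zero_padding) none), result)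

-- ===== PORT B =====
def group_keyvalue_dictionaries_alt (annotation_dicts : List (List (String × String))) (zero_padding : Int) : List String × List (List String) :=
  -- keys, rows = [], []
  -- for d in annotation_dicts:
  --     new = [k for k in d if k not in keys]
  --     keys = keys + new
  --     rows = [row + [""] * len(new) for row in rows]
  --     rows.append([d.get(k, "") for k in keys])
  let st : List String × List (List String) :=
    annotation_dicts.foldl
      (fun (st : List String × List (List String)) d =>
        let dd := PySem.Dict.ofList d
        let newk := dd.keys.filter (fun k => !(st.1.contains k))
        let keys' := st.1 ++ newk
        let rows' := st.2.map (fun row => row ++ List.replicate newk.length "")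
        (keys', rows' ++ [keys'.map (fun k => dd.getD k "")]))
      ([], [])
  -- return [k[zero_padding:] for k in keys], rows
  (st.1.map (fun k => PySem.Str.slice k (some zero_padding) none), st.2)

-- ===== PRECONDITION & SPEC =====
def Spec_group_keyvalue_dictionaries (annotation_dicts : List (List (String × String))) (zero_padding : Int) (out : List String × List (List String)) : Prop := out = group_keyvalue_dictionaries_alt annotation_dicts zero_padding
instance (annotation_dicts : List (List (String × String))) (zero_padding : Int) (out : List String × List (List String)) : Decidable (Spec_group_keyvalue_dictionaries annotation_dicts zero_padding out) := by unfold Spec_group_keyvalue_dictionaries; infer_instance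

-- ===== CLAIM (what is proved, stated in full; the proofs are below) =====
def Claim_equal_group_keyvalue_dictionaries : Prop := ∀ (annotation_dicts : List (List (String × String))) (zero_padding : Int), Dom_group_keyvalue_dictionaries annotation_dicts zero_padding → Spec_group_keyvalue_dictionaries annotation_dicts zero_padding (group_keyvalue_dictionaries annotation_dicts zero_padding)

-- ===== LEMMAS AND PROOFS =====

-- the first-appearance key union, as a reference fold
def pvUnion (annotation_dicts : List (List (String × String))) (s : PySem.Set String) : PySem.Set String :=
  annotation_dicts.foldl (fun s d => PySem.Set.update s ((PySem.Dict.ofList d).keys)) s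

-- the row both programs produce for one dict over a key list
def pvRow (K : List String) (d : List (String × String)) : List String :=
  K.map (fun k => (PySem.Dict.ofList d).getD k "")

-- A's OrderedDict-of-None union loop has the same keys as the reference union
lemma a_keys_eq_union (annotation_dicts : List (List (String × String)))
    (acc : PySem.Dict String (Option String)) :
    (annotation_dicts.foldl
        (fun acc d => acc.update (((PySem.Dict.ofList d).keys).map (fun k => (k, (none : Option String)))))
        acc).keys
      = pvUnion annotation_dicts acc.keys := by
  induction annotation_dicts generalizing acc with
  | nil => simp [pvUnion]
  | cons d ds ih =>
    simp only [List.foldl_cons, pvUnion, ih]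
    have h : (acc.update (((PySem.Dict.ofList d).keys).map (fun k => (k, (none : Option String))))).keys
        = PySem.Set.update acc.keys ((PySem.Dict.ofList d).keys) := by
      show (List.foldl (fun (a : PySem.Dict String (Option String)) (p : String × Option String) => a.insert p.1 p.2)
              acc (((PySem.Dict.ofList d).keys).map (fun k => (k, (none : Option String))))).keys = _
      rw [List.foldl_map]
      rw [PySem.Dict.keys_foldl_insert _ (fun _ _ => (none : Option String))]
    rw [h]

lemma nodup_union (annotation_dicts : List (List (String × String))) (s : PySem.Set String)
    (hs : s.Nodup) : (pvUnion annotation_dicts s).Nodup := by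
  induction annotation_dicts generalizing s with
  | nil => simpa [pvUnion]
  | cons d ds ih => exact ih _ (PySem.Set.nodup_update _ _ hs)

lemma mem_union_mono (ds : List (List (String × String))) (s : PySem.Set String) (k : String)
    (h : k ∈ s) : k ∈ pvUnion ds s := by
  induction ds generalizing s with
  | nil => simpa [pvUnion]
  | cons d es ih => exact ih _ ((PySem.Set.mem_update _ _ _).mpr (Or.inl h))

-- every key of every listed dict lands in the union
lemma mem_union_of_mem (d : List (String × String)) (k : String)
    (hk : k ∈ (PySem.Dict.ofList d).keys) :
    ∀ (ds : List (List (String × String))) (s : PySem.Set String), d ∈ ds → k ∈ pvUnion ds s := by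
  intro ds
  induction ds with
  | nil => intro s hd; cases hd
  | cons d' es ih =>
    intro s hd
    rcases List.mem_cons.mp hd with h | h
    · subst h; exact mem_union_mono es _ k ((PySem.Set.mem_update _ _ _).mpr (Or.inr hk))
    · exact ih _ h

-- getD on a template whose every stored value is ""
lemma getD_template (ks : List String) (e : PySem.Dict String String) (k : String)
    (he : e.getD k "" = "") :
    (ks.foldl (fun (o : PySem.Dict String String) (k : String) => o.insert k "") e).getD k "" = "" := by
  induction ks generalizing e with
  | nil => simpa
  | cons a ks ih =>
    simp only [List.foldl_cons]
    exact ih _ (by rw [PySem.Dict.getD_insert]; split <;> simp [he])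

-- updating two dicts that agree at k (w.r.t. getD) keeps them agreeing at k
lemma getD_update_congr (ps : List (String × String)) (t t' : PySem.Dict String String)
    (k : String) (h : t.getD k "" = t'.getD k "") :
    (t.update ps).getD k "" = (t'.update ps).getD k "" := by
  induction ps generalizing t t' with
  | nil => simpa [PySem.Dict.update]
  | cons p ps ih =>
    show (List.foldl _ (t.insert p.1 p.2) ps).getD k "" = (List.foldl _ (t'.insert p.1 p.2) ps).getD k ""
    exact ih _ _ (by rw [PySem.Dict.getD_insert, PySem.Dict.getD_insert]; split <;> simp [h])

-- keys of A's per-object template+overlay dict are exactly all_key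
lemma obj_keys (all_key : List String) (d : List (String × String))
    (hnd : all_key.Nodup)
    (hsub : ∀ k ∈ (PySem.Dict.ofList d).keys, k ∈ all_key) :
    ((all_key.foldl (fun (o : PySem.Dict String String) (k : String) => o.insert k "") PySem.Dict.empty).update d).keys = all_key := by
  have ht : (all_key.foldl (fun (o : PySem.Dict String String) (k : String) => o.insert k "") PySem.Dict.empty).keys = all_key := by
    rw [PySem.Dict.keys_foldl_insert all_key (fun _ _ => "") PySem.Dict.empty]
    simp [PySem.Set.update_nil_left, PySem.Set.ofList_eq_self_of_nodup _ hnd]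
  show (List.foldl (fun (a : PySem.Dict String String) (p : String × String) => a.insert p.1 p.2) _ d).keys = all_key
  rw [PySem.Dict.keys_foldl_insert_key d (fun (p : String × String) => p.1) (fun _ p => p.2), ht]
  rw [PySem.Set.update_eq_append_filter]
  have hmem : ∀ k ∈ PySem.Set.ofList (d.map (fun p => p.1)), k ∈ all_key := by
    intro k hk
    have hk2 : k ∈ (PySem.Dict.ofList d).keys := by
      show k ∈ (List.foldl (fun (a : PySem.Dict String String) (p : String × String) => a.insert p.1 p.2) PySem.Dict.empty d).keys
      rw [PySem.Dict.keys_foldl_insert_key d (fun (p : String × String) => p.1) (fun _ p => p.2)]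
      simpa [PySem.Set.update_nil_left] using hk
    exact hsub k hk2
  have hfil : List.filter (fun y => !PySem.Set.contains all_key y) (PySem.Set.ofList (d.map (fun p => p.1))) = [] := by
    apply List.filter_eq_nil_iff.mpr
    intro k hk
    simp [hmem k hk]
  rw [hfil, List.append_nil]

-- the row A computes for one object equals the reference row
lemma row_eq (all_key : List String) (d : List (String × String))
    (hnd : all_key.Nodup)
    (hsub : ∀ k ∈ (PySem.Dict.ofList d).keys, k ∈ all_key) :
    ((all_key.foldl (fun (o : PySem.Dict String String) (k : String) => o.insert k "") PySem.Dict.empty).update d).values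
      = pvRow all_key d := by
  have hk := obj_keys all_key d hnd hsub
  have hnodup : ((all_key.foldl (fun (o : PySem.Dict String String) (k : String) => o.insert k "") PySem.Dict.empty).update d).keys.Nodup := by
    rw [hk]; exact hnd
  rw [PySem.Dict.values_eq_map_keys _ hnodup "", hk]
  apply List.map_congr_left
  intro k _
  exact getD_update_congr d _ PySem.Dict.empty k (by rw [getD_template all_key PySem.Dict.empty k (by simp)]; simp)

-- extending the key list with keys absent from d pads d's row with ""
lemma row_append (K E : List String) (d : List (String × String))
    (hdisj : ∀ k ∈ E, k ∉ (PySem.Dict.ofList d).keys) :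
    pvRow (K ++ E) d = pvRow K d ++ List.replicate E.length "" := by
  unfold pvRow
  rw [List.map_append]
  congr 1
  have : ∀ k ∈ E, (PySem.Dict.ofList d).getD k "" = "" := by
    intro k hk
    apply PySem.Dict.getD_of_not_contains
    rw [Bool.eq_false_iff]
    intro hc
    exact hdisj k hk ((PySem.Dict.contains_iff_mem_keys _ _).mp hc)
  calc E.map (fun k => (PySem.Dict.ofList d).getD k "")
      = E.map (fun _ => "") := List.map_congr_left this
    _ = List.replicate E.length "" := by simp

-- B's streaming invariant: starting from keys K covering all processed dicts P (rows already built),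
-- the fold reaches the reference union and the reference rows over it
lemma b_fold_invariant (ds : List (List (String × String))) (K : List String)
    (P : List (List (String × String)))
    (hnd : K.Nodup)
    (hsub : ∀ d ∈ P, ∀ k ∈ (PySem.Dict.ofList d).keys, k ∈ K) :
    ds.foldl
      (fun (st : List String × List (List String)) d =>
        let dd := PySem.Dict.ofList d
        let newk := dd.keys.filter (fun k => !(st.1.contains k))
        let keys' := st.1 ++ newk
        let rows' := st.2.map (fun row => row ++ List.replicate newk.length "")
        (keys', rows' ++ [keys'.map (fun k => dd.getD k "")]))
      (K, P.map (fun d => pvRow K d))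
      = (pvUnion ds K, (P ++ ds).map (fun d => pvRow (pvUnion ds K) d)) := by
  induction ds generalizing K P with
  | nil => simp [pvUnion]
  | cons d ds ih =>
    simp only [List.foldl_cons]
    set dd := PySem.Dict.ofList d with hdd
    have hkeysnd : dd.keys.Nodup := PySem.Dict.nodup_keys_ofList d
    set newk := dd.keys.filter (fun k => !(K.contains k)) with hnewk
    have hK' : K ++ newk = PySem.Set.update K dd.keys := by
      rw [PySem.Set.update_eq_append_filter, PySem.Set.ofList_eq_self_of_nodup _ hkeysnd]
      simp [hnewk]
    -- new keys are not keys of any processed dict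
    have hnewnot : ∀ k ∈ newk, k ∉ K := by
      intro k hk
      have := List.of_mem_filter hk
      simp only [Bool.not_eq_true'] at this
      simpa using this
    have hrows : (P.map (fun d' => pvRow K d')).map (fun row => row ++ List.replicate newk.length "")
        = P.map (fun d' => pvRow (K ++ newk) d') := by
      rw [List.map_map]
      apply List.map_congr_left
      intro d' hd'
      show pvRow K d' ++ List.replicate newk.length "" = pvRow (K ++ newk) d'
      rw [row_append K newk d' (fun k hk hkd => hnewnot k hk (hsub d' hd' k hkd))]
    have hrow : (K ++ newk).map (fun k => dd.getD k "") = pvRow (K ++ newk) d := rfl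
    simp only [hrows, hrow]
    have hstep : (P.map (fun d' => pvRow (K ++ newk) d')) ++ [pvRow (K ++ newk) d]
        = (P ++ [d]).map (fun d' => pvRow (K ++ newk) d') := by
      simp
    rw [hstep]
    have hnd' : (K ++ newk).Nodup := by rw [hK']; exact PySem.Set.nodup_update _ _ hnd
    have hsub' : ∀ d' ∈ P ++ [d], ∀ k ∈ (PySem.Dict.ofList d').keys, k ∈ K ++ newk := by
      intro d' hd' k hk
      rw [hK']
      rcases List.mem_append.mp hd' with h | h
      · exact (PySem.Set.mem_update _ _ _).mpr (Or.inl (hsub d' h k hk))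
      · simp only [List.mem_singleton] at h; subst h
        exact (PySem.Set.mem_update _ _ _).mpr (Or.inr hk)
    have := ih (K ++ newk) (P ++ [d]) hnd' hsub'
    rw [this, hK']
    have hUnion : pvUnion (d :: ds) K = pvUnion ds (PySem.Set.update K dd.keys) := by
      simp [pvUnion, hdd]
    rw [← hUnion]
    simp

-- ===== VERDICT (by name: the statement is the Claim_ definition above) =====
theorem group_keyvalue_dictionaries_spec : Claim_equal_group_keyvalue_dictionaries := by
  intro ds zp _
  show group_keyvalue_dictionaries ds zp = group_keyvalue_dictionaries_alt ds zp
  simp only [group_keyvalue_dictionaries, group_keyvalue_dictionaries_alt]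
  have hb := b_fold_invariant ds [] [] (by simp) (by simp)
  simp only [List.map_nil, List.nil_append] at hb
  rw [hb]
  have hkeys : (ds.foldl
      (fun acc d => acc.update (((PySem.Dict.ofList d).keys).map (fun k => (k, (none : Option String)))))
      PySem.Dict.empty).keys = pvUnion ds [] := by
    rw [a_keys_eq_union]; rfl
  rw [hkeys]
  refine Prod.ext rfl ?_
  have hnd : (pvUnion ds []).Nodup := nodup_union ds [] (by simp)
  have hrows : ∀ d ∈ ds,
      (((pvUnion ds []).foldl (fun (o : PySem.Dict String String) (k : String) => o.insert k "") PySem.Dict.empty).update d).values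
        = pvRow (pvUnion ds []) d := by
    intro d hd
    exact row_eq _ d hnd (fun k hk => mem_union_of_mem d k hk ds [] hd)
  calc ds.foldl (fun res d =>
          res ++ [(((pvUnion ds []).foldl (fun (o : PySem.Dict String String) (k : String) => o.insert k "") PySem.Dict.empty).update d).values]) []
      = ds.map (fun d =>
          (((pvUnion ds []).foldl (fun (o : PySem.Dict String String) (k : String) => o.insert k "") PySem.Dict.empty).update d).values) := by
        simpa using PySem.List.foldl_append_singleton_eq_map _ ds []
    _ = ds.map (fun d => pvRow (pvUnion ds []) d) := List.map_congr_left hrows
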